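-- pv_equiv track=rewrite | github.com/goyalayus/internet-explorer | src/internet_explorer/evaluator.py | _has_meaningful_tool_terms
-- ===== SOURCE A (Python) =====
-- GENERIC_TOOL_IDENTITY_TERMS = {
--     "api",
--     "apis",
--     "data",
--     "docs",
--     "documentation",
--     "developer",
--     "developers",
--     "platform",
--     "portal",
--     "service",
--     "services",
--     "home",
--     "homepage",
--     "contact",
--     "pricing",
-- }
--
-- def _has_meaningful_tool_terms(terms: list[str]) -> bool:
--     for term in terms:
--         normalized = str(term or "").strip().lower()
--         if not normalized:
--             continue
--         if normalized in GENERIC_TOOL_IDENTITY_TERMS: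
--             continue
--         return True
--     return False
-- ===== SOURCE B (Python) =====
-- GENERIC_TOOL_IDENTITY_TERMS = {
--     "api",
--     "apis",
--     "data",
--     "docs",
--     "documentation",
--     "developer",
--     "developers",
--     "platform",
--     "portal",
--     "service",
--     "services",
--     "home",
--     "homepage",
--     "contact",
--     "pricing",
-- }
--
--
-- def _has_meaningful_tool_terms(terms: list[str]) -> bool:
--     # Counting formulation: tally every normalized term once, then count the
--     # "boring" occurrences (empty or generic) by probing the tally from the
--     # side of the generic vocabulary; something meaningful exists iff the
--     # boring occurrences do not account for the whole list.
--     counts = {}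
--     for t in terms:
--         key = str(t or "").strip().lower()
--         counts[key] = counts.get(key, 0) + 1
--     boring = counts.get("", 0) + sum(counts.get(g, 0) for g in GENERIC_TOOL_IDENTITY_TERMS)
--     return boring < len(terms)
-- ===== Notes on version B (the rewrite author's own statement) =====
-- stated objective: alternative
-- what changed: Replaces A's early-exit search (per-term membership test against the generic set) by a counting algorithm: build a frequency dictionary of normalized terms in one pass, then probe it from the generic vocabulary's side and return whether the boring occurrences are fewer than the list length.
import Mathlib
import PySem

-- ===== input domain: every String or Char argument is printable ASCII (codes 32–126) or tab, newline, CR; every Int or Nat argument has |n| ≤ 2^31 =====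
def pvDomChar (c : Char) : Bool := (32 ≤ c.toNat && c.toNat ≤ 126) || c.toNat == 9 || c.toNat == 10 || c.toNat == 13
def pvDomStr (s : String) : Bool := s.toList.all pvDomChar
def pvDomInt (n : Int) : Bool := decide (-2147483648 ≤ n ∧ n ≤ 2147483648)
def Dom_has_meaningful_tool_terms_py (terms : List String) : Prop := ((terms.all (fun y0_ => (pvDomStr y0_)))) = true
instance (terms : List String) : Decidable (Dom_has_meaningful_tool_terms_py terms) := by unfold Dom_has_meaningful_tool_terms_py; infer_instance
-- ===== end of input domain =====

-- B replaces A's early-exit membership search by a counting algorithm: tally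
-- normalized terms in a dict, count the boring occurrences from the generic
-- vocabulary's side, and compare with the list length (objective: alternative).

-- module-level constant shared by both Pythons (a set literal)
def GENERIC_TOOL_IDENTITY_TERMS : PySem.Set String :=
  PySem.Set.ofList ["api", "apis", "data", "docs", "documentation", "developer",
    "developers", "platform", "portal", "service", "services", "home",
    "homepage", "contact", "pricing"]

-- ===== PORT A =====
-- loop with continue/early return; 'str(term or "")' is the identity on a str argument
def has_meaningful_tool_terms_py : List String → Bool
  | [] => false
  | term :: rest =>
    let normalized := PySem.Str.lower (PySem.Str.strip term)
    if normalized = "" then has_meaningful_tool_terms_py rest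
    else if PySem.Set.contains GENERIC_TOOL_IDENTITY_TERMS normalized then
      has_meaningful_tool_terms_py rest
    else true

-- ===== PORT B =====
-- counting loop over terms, then a sum over the generic set (a PySem.Set IS its list of elements)
def has_meaningful_tool_terms_py_alt (terms : List String) : Bool :=
  let counts : PySem.Dict String Int := terms.foldl (fun d t =>
      let key := PySem.Str.lower (PySem.Str.strip t)
      d.insert key (d.getD key 0 + 1)) PySem.Dict.empty
  let boring : Int := counts.getD "" 0 +
    (GENERIC_TOOL_IDENTITY_TERMS.map (fun g => counts.getD g 0)).sum
  decide (boring < (terms.length : Int))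

-- ===== PRECONDITION & SPEC =====
def Spec_has_meaningful_tool_terms_py (terms : List String) (out : Bool) : Prop := out = has_meaningful_tool_terms_py_alt terms
instance (terms : List String) (out : Bool) : Decidable (Spec_has_meaningful_tool_terms_py terms out) := by unfold Spec_has_meaningful_tool_terms_py; infer_instance

-- ===== CLAIM (what is proved, stated in full; the proofs are below) =====
def Claim_equal_has_meaningful_tool_terms_py : Prop := ∀ (terms : List String), Dom_has_meaningful_tool_terms_py terms → Spec_has_meaningful_tool_terms_py terms (has_meaningful_tool_terms_py terms)

-- ===== LEMMAS AND PROOFS =====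

-- A's loop returns true iff some term normalizes to a non-empty non-generic string
theorem portA_iff (terms : List String) :
    has_meaningful_tool_terms_py terms = true ↔
      ∃ t ∈ terms, PySem.Str.lower (PySem.Str.strip t) ≠ "" ∧
        PySem.Str.lower (PySem.Str.strip t) ∉ GENERIC_TOOL_IDENTITY_TERMS := by
  induction terms with
  | nil => simp [has_meaningful_tool_terms_py]
  | cons term rest ih =>
    simp only [has_meaningful_tool_terms_py, List.mem_cons]
    split_ifs with h1 h2
    · rw [ih]
      constructor
      · rintro ⟨t, ht, h⟩; exact ⟨t, Or.inr ht, h⟩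
      · rintro ⟨t, ht | ht, h⟩
        · subst ht; exact absurd h1 h.1
        · exact ⟨t, ht, h⟩
    · rw [ih]
      rw [PySem.Set.contains_iff] at h2
      constructor
      · rintro ⟨t, ht, h⟩; exact ⟨t, Or.inr ht, h⟩
      · rintro ⟨t, ht | ht, h⟩
        · subst ht; exact absurd h2 h.2
        · exact ⟨t, ht, h⟩
    · simp only [true_iff]
      refine ⟨term, Or.inl rfl, h1, ?_⟩
      intro hm
      exact h2 ((PySem.Set.contains_iff _ _).mpr hm)

-- a sum of per-key counts over a duplicate-free key list is a countP of membership
theorem sum_counts_nodup (L : List String) (hL : L.Nodup) (l : List String) :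
    (L.map (fun g => (l.count g : Int))).sum = (l.countP (fun x => decide (x ∈ L)) : Int) := by
  induction l with
  | nil => simp
  | cons x l ih =>
    have hcount : ∀ g : String, (x :: l).count g = l.count g + if x = g then 1 else 0 := by
      intro g; simp [List.count_cons, beq_iff_eq]
    have hmap : (L.map (fun g => ((x :: l).count g : Int))).sum =
        (L.map (fun g => (l.count g : Int))).sum +
        (L.map (fun g => if x = g then (1 : Int) else 0)).sum := by
      rw [← List.sum_map_add]
      congr 1
      apply List.map_congr_left
      intro g _
      rw [hcount g]
      push_cast
      split_ifs <;> simp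
    have hind : (L.map (fun g => if x = g then (1 : Int) else 0)).sum =
        if x ∈ L then (1 : Int) else 0 := by
      clear ih hmap hcount
      induction L with
      | nil => simp
      | cons g L ihL =>
        have hgL : g ∉ L := (List.nodup_cons.mp hL).1
        have := ihL (List.nodup_cons.mp hL).2
        simp only [List.map_cons, List.sum_cons, this, List.mem_cons]
        by_cases hxg : x = g
        · subst hxg
          simp [hgL]
        · simp [hxg, Ne.symm hxg]
    rw [hmap, ih, hind, List.countP_cons]
    by_cases hx : x ∈ L <;> simp [hx] <;> push_cast
  termination_by l.length

-- B's test returns true iff some term normalizes to a non-empty non-generic string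
theorem getD_counts_key_gen (l : List String) (f : String → String)
    (d : PySem.Dict String Int) (v : String) :
    (l.foldl (fun d t => d.insert (f t) (d.getD (f t) 0 + 1)) d).getD v 0 =
      d.getD v 0 + ((l.map f).count v : Int) := by
  induction l generalizing d with
  | nil => simp
  | cons x l ih =>
    simp only [List.foldl_cons, List.map_cons, ih, List.count_cons]
    by_cases h : v = f x
    · simp [h, PySem.Dict.getD_insert_self]
      ring
    · have hb : (f x == v) = false := by simp; exact fun e => h e.symm
      simp [PySem.Dict.getD_insert, hb, h]

theorem getD_counts_key (l : List String) (f : String → String) (v : String) :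
    (l.foldl (fun d t => d.insert (f t) (d.getD (f t) 0 + 1))
      (PySem.Dict.empty : PySem.Dict String Int)).getD v 0 = ((l.map f).count v : Int) := by
  rw [getD_counts_key_gen]
  simp [PySem.Dict.empty, PySem.Dict.getD, PySem.Dict.get?]

theorem portB_iff (terms : List String) :
    has_meaningful_tool_terms_py_alt terms = true ↔
      ∃ t ∈ terms, PySem.Str.lower (PySem.Str.strip t) ≠ "" ∧
        PySem.Str.lower (PySem.Str.strip t) ∉ GENERIC_TOOL_IDENTITY_TERMS := by
  unfold has_meaningful_tool_terms_py_alt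
  simp only [getD_counts_key]
  set l := terms.map (fun t => PySem.Str.lower (PySem.Str.strip t)) with hl
  set L := ("" :: GENERIC_TOOL_IDENTITY_TERMS : List String) with hL
  have hLnd : L.Nodup := by rw [hL]; decide
  have hsum : (l.count "" : Int) +
      (GENERIC_TOOL_IDENTITY_TERMS.map (fun g => (l.count g : Int))).sum =
      (l.countP (fun x => decide (x ∈ L)) : Int) := by
    rw [← sum_counts_nodup L hLnd l, hL]
    simp
  rw [hsum]
  have hle : l.countP (fun x => decide (x ∈ L)) ≤ l.length := List.countP_le_length
  have hlen : l.length = terms.length := by rw [hl, List.length_map]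
  constructor
  · intro h
    have hlt : l.countP (fun x => decide (x ∈ L)) < l.length := by
      rw [hlen]; exact_mod_cast of_decide_eq_true h
    have : ¬ ∀ x ∈ l, x ∈ L := by
      intro hall
      have := (List.countP_eq_length (p := fun x => decide (x ∈ L))).mpr
        (by intro a ha; simpa using hall a ha)
      omega
    push Not at this
    obtain ⟨x, hxl, hxL⟩ := this
    obtain ⟨t, ht, rfl⟩ := List.mem_map.mp (hl ▸ hxl)
    rw [hL] at hxL
    simp only [List.mem_cons, not_or] at hxL
    exact ⟨t, ht, hxL.1, hxL.2⟩
  · rintro ⟨t, ht, hne, hng⟩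
    have hxl : PySem.Str.lower (PySem.Str.strip t) ∈ l := hl ▸ List.mem_map.mpr ⟨t, ht, rfl⟩
    have hxL : PySem.Str.lower (PySem.Str.strip t) ∉ L := by
      rw [hL]; simp only [List.mem_cons, not_or]; exact ⟨hne, hng⟩
    have hlt : l.countP (fun x => decide (x ∈ L)) < l.length := by
      rcases lt_or_eq_of_le hle with h | h
      · exact h
      · exfalso
        have := List.countP_eq_length.mp h _ hxl
        simp at this
        exact hxL this
    simp only [decide_eq_true_eq]
    rw [← hlen]
    exact_mod_cast hlt

-- ===== VERDICT (by name: the statement is the Claim_ definition above) =====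
theorem has_meaningful_tool_terms_py_spec : Claim_equal_has_meaningful_tool_terms_py := by
  intro terms _
  unfold Spec_has_meaningful_tool_terms_py
  rw [Bool.eq_iff_iff, portA_iff, portB_iff]
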